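-- pv_equiv track=rewrite | github.com/Thompson-cyber/llmsource | approach/clone_utils.py | analysis_log
-- ===== SOURCE A (Python) =====
-- def analysis_log(log):
--     fingerprints = set()
--     clone_dict = {}
--     for i in range(0, len(log)):
--         line = log[i]
--         if 'duplicate lines with fingerprint' in line:
--             # update the information
--             suffix = line.split('fingerprint ')[1]
--             fingerprint = suffix.split(' in')[0]
--             prefix = line.split(' duplicate')[0]
--             clone_line_len = int(prefix.split('Found ')[1])
--             generated_py_flag = False
--             a_may_clone_code_flag = False
--             for found_line_num in range(i + 1, len(log)):
--                 found_line = log[found_line_num]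
--                 if "Between lines " in found_line:
--                     if "generated.py" in found_line:
--                         generated_py_flag = True
--                         generated_line = found_line
--                     if "a_may_clone_code" in found_line:
--                         a_may_clone_code_flag = True
--                 else:
--                     break
--             if generated_py_flag and a_may_clone_code_flag:
--                 fingerprints.add(fingerprint)
--                 if fingerprint in clone_dict:
--                     clone_dict[fingerprint].add(generated_line)
--                 else:
--                     temp_set = set()
--                     temp_set.add(generated_line)
--                     clone_dict[fingerprint] = temp_set
--     # xxx duplicate lines with figerprint xxx.bwtew
--     return fingerprints, clone_dict
-- ===== SOURCE B (Python) =====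
-- def analysis_log(log):
--     # One forward pass with a list of open block states instead of an inner rescan.
--     fingerprints = set()
--     clone_dict = {}
--     open_blocks = []  # each: [fingerprint, generated_py_flag, a_may_clone_code_flag, generated_line]
--
--     def close_all():
--         for fp, gflag, cflag, gline in open_blocks:
--             if gflag and cflag:
--                 fingerprints.add(fp)
--                 if fp in clone_dict:
--                     clone_dict[fp].add(gline)
--                 else:
--                     clone_dict[fp] = {gline}
--         open_blocks.clear()
--
--     for line in log:
--         if "Between lines " in line:
--             for b in open_blocks:
--                 if "generated.py" in line:
--                     b[1] = True
--                     b[3] = line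
--                 if "a_may_clone_code" in line:
--                     b[2] = True
--         else:
--             close_all()
--         if 'duplicate lines with fingerprint' in line:
--             fingerprint = line.split('fingerprint ')[1].split(' in')[0]
--             open_blocks.append([fingerprint, False, False, None])
--     close_all()
--     return fingerprints, clone_dict
-- ===== Notes on version B (the rewrite author's own statement) =====
-- stated objective: alternative
-- what changed: Replaced A's inner rescan of the following lines (restarted at every fingerprint line) by a single forward pass that carries the open block states (fingerprint, flags, last generated.py line) and finalizes them when a non-'Between lines' line or the end of the log is reached.
import Mathlib
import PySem

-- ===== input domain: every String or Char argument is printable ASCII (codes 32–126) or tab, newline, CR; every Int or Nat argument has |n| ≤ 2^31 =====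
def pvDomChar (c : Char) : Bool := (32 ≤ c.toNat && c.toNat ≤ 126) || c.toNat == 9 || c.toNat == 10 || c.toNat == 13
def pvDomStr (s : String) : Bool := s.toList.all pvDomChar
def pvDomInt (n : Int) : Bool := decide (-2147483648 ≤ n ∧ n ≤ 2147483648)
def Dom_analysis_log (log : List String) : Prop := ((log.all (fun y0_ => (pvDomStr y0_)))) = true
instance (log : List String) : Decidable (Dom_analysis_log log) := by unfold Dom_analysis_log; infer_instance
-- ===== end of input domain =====

-- B replaces A's inner rescan of the following lines by a single forward pass that carries the
-- open block states; return-value equivalence only (neither version mutates its argument).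

-- ===== PORT A =====
-- s.split(sep) for a nonempty literal sep (split? is none only for sep = "")
def pvSplit (s sep : String) : List String := (PySem.Str.split? s sep).getD []

-- helpers shared by both ports: both Python versions contain this code verbatim.
def pvBetween (line : String) : Bool := PySem.Str.isIn "Between lines " line

def pvFPphrase (line : String) : Bool := PySem.Str.isIn "duplicate lines with fingerprint" line

-- fingerprint = line.split('fingerprint ')[1].split(' in')[0]   ([1] exists under Pre_)
def pvFingerprintOf (line : String) : String :=
  (pvSplit ((pvSplit line "fingerprint ").getD 1 "") " in").getD 0 ""

-- the two flag updates performed on a 'Between lines ' line (state: generated_py_flag,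
-- a_may_clone_code_flag, generated_line; the latter read only when the first flag is true)
def pvUpdFlags (fl : String) (f : Bool × Bool × String) : Bool × Bool × String :=
  let f1 := if PySem.Str.isIn "generated.py" fl then (true, f.2.1, fl) else f
  if PySem.Str.isIn "a_may_clone_code" fl then (f1.1, true, f1.2.2) else f1

-- 'if generated_py_flag and a_may_clone_code_flag: fingerprints.add(...); clone_dict ...'
def pvCommit (st : PySem.Set String × PySem.Dict String (PySem.Set String))
    (b : String × Bool × Bool × String) :
    PySem.Set String × PySem.Dict String (PySem.Set String) :=
  if b.2.1 && b.2.2.1 then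
    (PySem.Set.add st.1 b.1,
     if st.2.contains b.1 then
       st.2.modify b.1 PySem.Set.empty (fun s => PySem.Set.add s b.2.2.2)
     else
       st.2.insert b.1 (PySem.Set.add PySem.Set.empty b.2.2.2))
  else st

-- A's inner 'for found_line_num in range(i+1, len(log))' with its break
def pvInnerA (log : List String) : List Int → Bool × Bool × String → Bool × Bool × String
  | [], f => f
  | j :: js, f =>
      let found_line := PySem.List.pyGetD log j ""   -- j is always in range here (log[found_line_num])
      if pvBetween found_line then pvInnerA log js (pvUpdFlags found_line f) else f

-- A's outer loop body for index i
def pvStepA (log : List String)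
    (st : PySem.Set String × PySem.Dict String (PySem.Set String)) (i : Int) :
    PySem.Set String × PySem.Dict String (PySem.Set String) :=
  let line := PySem.List.pyGetD log i ""             -- i is always in range (log[i])
  if pvFPphrase line then
    let fingerprint := pvFingerprintOf line
    let prefx := (pvSplit line " duplicate").getD 0 ""
    -- clone_line_len = int(prefix.split('Found ')[1]) : computed and unused; Pre_ excludes the raises
    let _clone_line_len := PySem.Int.ofStr? ((pvSplit prefx "Found ").getD 1 "")
    let f := pvInnerA log (PySem.List.pyRange (i + 1) (log.length : Int) 1) (false, false, "")
    pvCommit st (fingerprint, f)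
  else st

def analysis_log (log : List String) : List String × (List (String × List String)) :=
  let st := (PySem.List.pyRange 0 (log.length : Int) 1).foldl (pvStepA log)
    (PySem.Set.empty, PySem.Dict.empty)
  (st.1, st.2.items)

-- ===== PORT B =====
-- a block state: (fingerprint, generated_py_flag, a_may_clone_code_flag, generated_line)
def pvUpdB (line : String) (b : String × Bool × Bool × String) : String × Bool × Bool × String :=
  (b.1, pvUpdFlags line b.2)

-- close_all: commit every open block in order
def pvClose (st : PySem.Set String × PySem.Dict String (PySem.Set String))
    (bs : List (String × Bool × Bool × String)) :
    PySem.Set String × PySem.Dict String (PySem.Set String) :=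
  bs.foldl pvCommit st

def pvStepB (s : (PySem.Set String × PySem.Dict String (PySem.Set String)) × List (String × Bool × Bool × String))
    (line : String) :
    (PySem.Set String × PySem.Dict String (PySem.Set String)) × List (String × Bool × Bool × String) :=
  let s1 := if pvBetween line then (s.1, s.2.map (pvUpdB line)) else (pvClose s.1 s.2, [])
  if pvFPphrase line then (s1.1, s1.2 ++ [(pvFingerprintOf line, false, false, "")]) else s1

def analysis_log_alt (log : List String) : List String × (List (String × List String)) :=
  let s := log.foldl pvStepB ((PySem.Set.empty, PySem.Dict.empty), [])
  let st := pvClose s.1 s.2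
  (st.1, st.2.items)

-- ===== PRECONDITION & SPEC =====
-- Pre_ excludes exactly the inputs on which A raises: a line containing the fingerprint phrase
-- must contain 'fingerprint ' (else split(...)[1] is an IndexError), its part before ' duplicate'
-- must contain 'Found ' (IndexError), and the piece after 'Found ' must parse as int (ValueError).
def Pre_analysis_log (log : List String) : Prop :=
  ∀ line ∈ log, pvFPphrase line = true →
    PySem.Str.isIn "fingerprint " line = true ∧
    PySem.Str.isIn "Found " ((pvSplit line " duplicate").getD 0 "") = true ∧
    (PySem.Int.ofStr? ((pvSplit ((pvSplit line " duplicate").getD 0 "") "Found ").getD 1 "")).isSome = true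
instance (log : List String) : Decidable (Pre_analysis_log log) := by
  unfold Pre_analysis_log; infer_instance

def pvWitness_analysis_log : List String :=
  ["Found 3 duplicate lines with fingerprint abc in x",
   "Between lines 1-2 of generated.py",
   "Between lines 3-4 of a_may_clone_code"]

def Spec_analysis_log (log : List String) (out : List String × (List (String × List String))) : Prop := out = analysis_log_alt log
instance (log : List String) (out : List String × (List (String × List String))) : Decidable (Spec_analysis_log log out) := by unfold Spec_analysis_log; infer_instance

-- ===== CLAIM (what is proved, stated in full; the proofs are below) =====
def Claim_equal_analysis_log : Prop := ∀ (log : List String), Dom_analysis_log log → Pre_analysis_log log → Spec_analysis_log log (analysis_log log)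

-- ===== LEMMAS AND PROOFS =====

-- the lines of a block's scan: the 'Between lines ' prefix of the remaining log
def pvTW (rest : List String) : List String := rest.takeWhile pvBetween

def pvMergeF (ls : List String) (f : Bool × Bool × String) : Bool × Bool × String :=
  ls.foldl (fun f l => pvUpdFlags l f) f

def pvMergeBlk (ls : List String) (b : String × Bool × Bool × String) : String × Bool × Bool × String :=
  (b.1, pvMergeF ls b.2)

-- the common structural form of both programs
def pvAgo : List String → (PySem.Set String × PySem.Dict String (PySem.Set String)) →
    (PySem.Set String × PySem.Dict String (PySem.Set String))
  | [], st => st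
  | l :: rest, st =>
      pvAgo rest (if pvFPphrase l then
          pvCommit st (pvMergeBlk (pvTW rest) (pvFingerprintOf l, false, false, ""))
        else st)

theorem pvClose_append (st : PySem.Set String × PySem.Dict String (PySem.Set String))
    (xs : List (String × Bool × Bool × String)) (y : String × Bool × Bool × String) :
    pvClose st (xs ++ [y]) = pvCommit (pvClose st xs) y := by
  simp [pvClose]

theorem pvInnerA_eq (log : List String) : ∀ (n j : Nat), log.length - j ≤ n → ∀ f,
    pvInnerA log (PySem.List.pyRange (j : Int) (log.length : Int) 1) f
      = pvMergeF (pvTW (log.drop j)) f := by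
  intro n
  induction n with
  | zero =>
      intro j hj f
      have h1 : PySem.List.pyRange (j : Int) (log.length : Int) 1 = [] :=
        List.eq_nil_of_length_eq_zero (by rw [PySem.List.length_pyRange_one]; omega)
      have h2 : log.drop j = [] := List.drop_eq_nil_of_le (by omega)
      rw [h1, h2]; rfl
  | succ n ih =>
      intro j hj f
      by_cases hlt : j < log.length
      · have hclt : (j : Int) < (log.length : Int) := by exact_mod_cast hlt
        have hget : PySem.List.pyGetD log (j : Int) "" = log[j] := by
          rw [PySem.List.pyGetD_natCast]; exact List.getD_eq_getElem log "" hlt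
        have hcast : ((j : Int) + 1) = (((j + 1 : Nat) : Int)) := by push_cast; ring
        have hdrop : log.drop j = log[j] :: log.drop (j + 1) := List.drop_eq_getElem_cons hlt
        rw [PySem.List.pyRange_one_cons hclt, hdrop]
        by_cases hb : pvBetween log[j]
        · simp only [pvInnerA, hget, hb, if_pos, pvTW, List.takeWhile_cons_of_pos hb]
          rw [hcast, ih (j + 1) (by omega)]
          rfl
        · have htw : List.takeWhile pvBetween (log[j] :: log.drop (j + 1)) = [] := by
            rw [List.takeWhile_cons_of_neg] ; simp [hb]
          simp only [pvInnerA, hget, hb, pvTW, htw, Bool.false_eq_true, if_false]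
          rfl
      · have h1 : PySem.List.pyRange (j : Int) (log.length : Int) 1 = [] :=
          List.eq_nil_of_length_eq_zero (by rw [PySem.List.length_pyRange_one]; omega)
        have h2 : log.drop j = [] := List.drop_eq_nil_of_le (by omega)
        rw [h1, h2]; rfl

theorem pvOuterA_eq (log : List String) : ∀ (n j : Nat), log.length - j ≤ n → ∀ st,
    (PySem.List.pyRange (j : Int) (log.length : Int) 1).foldl (pvStepA log) st
      = pvAgo (log.drop j) st := by
  intro n
  induction n with
  | zero =>
      intro j hj st
      have h1 : PySem.List.pyRange (j : Int) (log.length : Int) 1 = [] :=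
        List.eq_nil_of_length_eq_zero (by rw [PySem.List.length_pyRange_one]; omega)
      have h2 : log.drop j = [] := List.drop_eq_nil_of_le (by omega)
      rw [h1, h2]; rfl
  | succ n ih =>
      intro j hj st
      by_cases hlt : j < log.length
      · have hclt : (j : Int) < (log.length : Int) := by exact_mod_cast hlt
        have hget : PySem.List.pyGetD log (j : Int) "" = log[j] := by
          rw [PySem.List.pyGetD_natCast]; exact List.getD_eq_getElem log "" hlt
        have hcast : ((j : Int) + 1) = (((j + 1 : Nat) : Int)) := by push_cast; ring
        have hdrop : log.drop j = log[j] :: log.drop (j + 1) := List.drop_eq_getElem_cons hlt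
        have hstep : pvStepA log st (j : Int)
            = (if pvFPphrase log[j] then
                 pvCommit st (pvMergeBlk (pvTW (log.drop (j + 1))) (pvFingerprintOf log[j], false, false, ""))
               else st) := by
          simp only [pvStepA, hget]
          rw [hcast, pvInnerA_eq log log.length (j + 1) (by omega)]
          rfl
        rw [PySem.List.pyRange_one_cons hclt, List.foldl_cons, hstep, hdrop]
        show _ = pvAgo (log.drop (j + 1)) _
        rw [hcast, ih (j + 1) (by omega)]
      · have h1 : PySem.List.pyRange (j : Int) (log.length : Int) 1 = [] :=
          List.eq_nil_of_length_eq_zero (by rw [PySem.List.length_pyRange_one]; omega)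
        have h2 : log.drop j = [] := List.drop_eq_nil_of_le (by omega)
        rw [h1, h2]; rfl

theorem pvB_eq : ∀ (rest : List String) st bs,
    (let s := rest.foldl pvStepB (st, bs); pvClose s.1 s.2)
      = pvAgo rest (pvClose st (bs.map (pvMergeBlk (pvTW rest)))) := by
  intro rest
  induction rest with
  | nil =>
      intro st bs
      have hm : bs.map (pvMergeBlk (pvTW [])) = bs := by
        have h : pvMergeBlk (pvTW []) = fun b => b := by funext b; rfl
        rw [h]; exact List.map_id' bs
      show pvClose st bs = pvAgo [] (pvClose st (bs.map (pvMergeBlk (pvTW []))))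
      rw [hm]; rfl
  | cons l t ih =>
      intro st bs
      have hmm : ∀ bs2 : List (String × Bool × Bool × String),
          (bs2.map (pvUpdB l)).map (pvMergeBlk (pvTW t)) = bs2.map (pvMergeBlk (l :: pvTW t)) := by
        intro bs2; rw [List.map_map]; rfl
      by_cases hb : pvBetween l
      · have htw : pvTW (l :: t) = l :: pvTW t := List.takeWhile_cons_of_pos hb
        by_cases hf : pvFPphrase l
        · show (let s := t.foldl pvStepB (pvStepB (st, bs) l); pvClose s.1 s.2) = _
          rw [show pvStepB (st, bs) l = (st, bs.map (pvUpdB l) ++ [(pvFingerprintOf l, false, false, "")]) by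
                simp [pvStepB, hb, hf]]
          rw [ih st (bs.map (pvUpdB l) ++ [(pvFingerprintOf l, false, false, "")])]
          rw [List.map_append, hmm, List.map_singleton, pvClose_append, htw]
          simp only [pvAgo, if_pos hf]
        · show (let s := t.foldl pvStepB (pvStepB (st, bs) l); pvClose s.1 s.2) = _
          rw [show pvStepB (st, bs) l = (st, bs.map (pvUpdB l)) by simp [pvStepB, hb, hf]]
          rw [ih st (bs.map (pvUpdB l))]
          rw [hmm, htw]
          show _ = pvAgo t (if pvFPphrase l then _ else pvClose st (bs.map (pvMergeBlk (l :: pvTW t))))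
          rw [if_neg (by simp [hf])]
      · have htw : pvTW (l :: t) = [] := List.takeWhile_cons_of_neg (by simp [hb])
        have hm : bs.map (pvMergeBlk (pvTW (l :: t))) = bs := by
          rw [htw]
          have h : pvMergeBlk ([] : List String) = fun b => b := by funext b; rfl
          rw [h]; exact List.map_id' bs
        by_cases hf : pvFPphrase l
        · show (let s := t.foldl pvStepB (pvStepB (st, bs) l); pvClose s.1 s.2) = _
          rw [show pvStepB (st, bs) l = (pvClose st bs, [] ++ [(pvFingerprintOf l, false, false, "")]) by
                simp [pvStepB, hb, hf]]
          rw [ih (pvClose st bs) ([] ++ [(pvFingerprintOf l, false, false, "")])]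
          rw [hm]
          simp only [List.nil_append, List.map_singleton]
          show pvAgo t (pvClose (pvClose st bs) [pvMergeBlk (pvTW t) (pvFingerprintOf l, false, false, "")])
              = pvAgo (l :: t) (pvClose st bs)
          simp only [pvAgo, if_pos hf]
          rfl
        · show (let s := t.foldl pvStepB (pvStepB (st, bs) l); pvClose s.1 s.2) = _
          rw [show pvStepB (st, bs) l = (pvClose st bs, []) by simp [pvStepB, hb, hf]]
          rw [ih (pvClose st bs) [], hm]
          simp only [List.map_nil]
          show pvAgo t (pvClose (pvClose st bs) []) = pvAgo (l :: t) (pvClose st bs)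
          simp only [pvAgo, if_neg (by simp [hf] : ¬ pvFPphrase l = true)]
          rfl

-- ===== VERDICT (by name: the statement is the Claim_ definition above) =====
theorem analysis_log_spec : Claim_equal_analysis_log := by
  intro log _ _
  unfold Spec_analysis_log analysis_log analysis_log_alt
  have hA := pvOuterA_eq log log.length 0 (by omega) (PySem.Set.empty, PySem.Dict.empty)
  have hB := pvB_eq log (PySem.Set.empty, PySem.Dict.empty) []
  simp only [Nat.cast_zero, List.drop_zero] at hA
  simp only [List.map_nil, pvClose, List.foldl_nil] at hB
  simp only [pvClose, hA, hB]
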